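-- pv_equiv track=rewrite | github.com/davidkennedy02/temporary | hl7_utilities.py | sanitize_hl7_field
-- ===== SOURCE A (Python) =====
-- def sanitize_hl7_field(value: str) -> str:
--     """Basic sanitization to replace HL7 delimiters with space.
--     Full escaping is expensive and rare for this use case.
--
--     Args:
--         value (str): The field value to sanitize
--     Returns:
--         str: Sanitized field value
--     """
--     if not value:
--         return ""
--     str_val = str(value)
--     # Replace delimiters with space to avoid breaking structure
--     for char in ['|', '^', '~', '&', '\r', '\n']:
--         if char in str_val:
--             str_val = str_val.replace(char, ' ')
--     return str_val
-- ===== SOURCE B (Python) =====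
-- def sanitize_hl7_field(value: str) -> str:
--     """Single pass over the characters: blank out any HL7 delimiter."""
--     if not value:
--         return ""
--     delims = {'|', '^', '~', '&', '\r', '\n'}
--     return ''.join(' ' if c in delims else c for c in str(value))
-- ===== Notes on version B (the rewrite author's own statement) =====
-- stated objective: simpler
-- what changed: Replaced the six sequential whole-string .replace passes (one per delimiter, each preceded by a membership scan) by a single pass over the characters with a set membership test.
import Mathlib
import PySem

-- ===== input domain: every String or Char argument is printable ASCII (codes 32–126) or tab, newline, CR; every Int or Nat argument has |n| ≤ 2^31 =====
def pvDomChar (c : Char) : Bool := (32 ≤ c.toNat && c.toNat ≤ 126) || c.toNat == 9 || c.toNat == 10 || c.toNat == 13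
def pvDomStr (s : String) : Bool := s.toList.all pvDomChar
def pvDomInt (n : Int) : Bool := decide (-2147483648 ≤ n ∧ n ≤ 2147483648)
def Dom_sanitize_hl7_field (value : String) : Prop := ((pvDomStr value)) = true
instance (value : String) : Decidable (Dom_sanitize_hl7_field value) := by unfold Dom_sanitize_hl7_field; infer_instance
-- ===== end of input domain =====

-- B replaces A's six sequential whole-string replace passes by one pass over the
-- characters with a set membership test (objective: simpler, same exact output).

-- ===== PORT A =====
-- for char in ['|','^','~','&','\r','\n']: if char in str_val: str_val = str_val.replace(char, ' ')
def sanitize_hl7_field (value : String) : String :=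
  if value == "" then ""
  else
    (['|', '^', '~', '&', '\r', '\n']).foldl
      (fun str_val ch =>
        if PySem.Str.isIn (String.ofList [ch]) str_val then
          PySem.Str.replace str_val (String.ofList [ch]) " "
        else str_val)
      value

-- ===== PORT B =====
-- delims = {'|','^','~','&','\r','\n'}; ''.join(' ' if c in delims else c for c in value)
def pvDelims : PySem.Set Char := PySem.Set.ofList ['|', '^', '~', '&', '\r', '\n']

def sanitize_hl7_field_alt (value : String) : String :=
  if value == "" then ""
  else String.ofList (value.toList.map (fun c => if PySem.Set.contains pvDelims c then ' ' else c))

-- ===== PRECONDITION & SPEC =====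
def Spec_sanitize_hl7_field (value : String) (out : String) : Prop := out = sanitize_hl7_field_alt value
instance (value : String) (out : String) : Decidable (Spec_sanitize_hl7_field value out) := by unfold Spec_sanitize_hl7_field; infer_instance

-- ===== CLAIM (what is proved, stated in full; the proofs are below) =====
def Claim_equal_sanitize_hl7_field : Prop := ∀ (value : String), Dom_sanitize_hl7_field value → Spec_sanitize_hl7_field value (sanitize_hl7_field value)

-- ===== LEMMAS AND PROOFS =====

-- replace.go with a single-char pattern and fuel ≥ length is a pointwise map
theorem pv_go_single (d e : Char) : ∀ (l acc : List Char) (fuel : Nat), l.length ≤ fuel →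
    PySem.Chars.replace.go [d] [e] fuel l acc =
      acc.reverse ++ l.map (fun c => if c == d then e else c) := by
  intro l
  induction l with
  | nil =>
    intro acc fuel _
    cases fuel <;> simp [PySem.Chars.replace.go]
  | cons c t ih =>
    intro acc fuel hle
    cases fuel with
    | zero => simp at hle
    | succ n =>
      simp only [List.length_cons, Nat.succ_le_succ_iff] at hle
      by_cases hcd : c = d
      · subst hcd
        rw [show PySem.Chars.replace.go [c] [e] (n+1) (c :: t) acc
              = PySem.Chars.replace.go [c] [e] n t ([e].reverse ++ acc) by
            simp [PySem.Chars.replace.go, List.isPrefixOf]]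
        rw [ih _ n hle]
        simp
      · rw [show PySem.Chars.replace.go [d] [e] (n+1) (c :: t) acc
              = PySem.Chars.replace.go [d] [e] n t (c :: acc) by
            simp [PySem.Chars.replace.go, List.isPrefixOf,
              show (d == c) = false from beq_eq_false_iff_ne.mpr (Ne.symm hcd)]]
        rw [ih _ n hle]
        simp [hcd]

-- single-char replace on char lists is a map
theorem pv_replace_single (d e : Char) (s : List Char) :
    PySem.Chars.replace s [d] [e] = s.map (fun c => if c == d then e else c) := by
  rw [PySem.Chars.replace]
  simp only [List.isEmpty_cons, if_neg (by decide : ¬ (false = true))]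
  simpa using pv_go_single d e s [] s.length le_rfl

-- one iteration of A's loop, on the toList level, is a map (whether or not ch occurs)
theorem pv_step (ch : Char) (s : String) :
    (if PySem.Str.isIn (String.ofList [ch]) s then PySem.Str.replace s (String.ofList [ch]) " " else s).toList
      = s.toList.map (fun c => if c == ch then ' ' else c) := by
  by_cases h : PySem.Str.isIn (String.ofList [ch]) s = true
  · rw [if_pos h]
    simp [PySem.Str.replace, pv_replace_single]
  · rw [if_neg h]
    have hmem : ch ∉ s.toList := by
      intro hmem
      apply h
      rw [PySem.Str.isIn_iff_infix]
      obtain ⟨pre, suf, heq⟩ := List.append_of_mem hmem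
      exact ⟨pre, suf, by simp [heq]⟩
    symm
    rw [List.map_congr_left (g := id) (fun c hc => by
      have hne : (c == ch) = false := beq_eq_false_iff_ne.mpr (fun h' => hmem (h' ▸ hc))
      simp [hne])]
    simp

set_option maxHeartbeats 1000000 in
theorem sanitize_hl7_field_eq_alt (value : String) :
    sanitize_hl7_field value = sanitize_hl7_field_alt value := by
  by_cases hv : value = ""
  · subst hv; rfl
  · have hb : ¬ ((value == "") = true) := by simpa using hv
    unfold sanitize_hl7_field sanitize_hl7_field_alt
    rw [if_neg hb, if_neg hb]
    have htl : ((['|', '^', '~', '&', '\r', '\n']).foldl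
        (fun str_val ch =>
          if PySem.Str.isIn (String.ofList [ch]) str_val then
            PySem.Str.replace str_val (String.ofList [ch]) " "
          else str_val) value).toList
        = value.toList.map (fun c => if PySem.Set.contains pvDelims c then ' ' else c) := by
      simp only [List.foldl_cons, List.foldl_nil]
      rw [pv_step, pv_step, pv_step, pv_step, pv_step, pv_step]
      simp only [List.map_map]
      apply List.map_congr_left
      intro c _
      simp only [Function.comp_apply, pvDelims, PySem.Set.contains_eq_listContains]
      by_cases h1 : c = '|' <;> by_cases h2 : c = '^' <;> by_cases h3 : c = '~' <;>
        by_cases h4 : c = '&' <;> by_cases h5 : c = '\r' <;> by_cases h6 : c = '\n' <;>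
        subst_vars <;> simp_all
    apply String.toList_inj.mp
    rw [htl]
    simp

-- ===== VERDICT (by name: the statement is the Claim_ definition above) =====
set_option maxHeartbeats 1000000 in
theorem sanitize_hl7_field_spec : Claim_equal_sanitize_hl7_field := by
  intro value _
  unfold Spec_sanitize_hl7_field
  exact sanitize_hl7_field_eq_alt value
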